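-- pv_equiv track=rewrite | github.com/Nickaha/CS370 | jimandtheskyscrapers.py | solve
-- ===== SOURCE A (Python) =====
-- def solve(arr):
--     #use a list to imitate a stack to store list pairs of the heights and number of routes for that height
--     stack = []
--     count = 0
--
--     for x in range(len(arr)):
--     	#iterate through the original list
--         while len(stack) != 0:
--             #while stack is not empty
--             if arr[x] > stack[-1][0]:
--                 #if the current number is higher than most recent element in stack pop since a valid route cannot be made
--                 stack.pop();
--             else:
--                 #if current number is less than most recent element in stack break out of loop since a valid route can be made
--                 break;
--         if(len(stack) != 0):
--             #if the stack is not empty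
--             if(arr[x] == stack[-1][0]):
--                 #if the current height matches the height of the most recent element in the stack a valid route exists
--                 #increment the count by the value of most recent element in the stack * 2 since backwards also counts as a valid route
--                 count = count + (stack[-1][1]*2)
--                 #increment the number of routes for that height by 1
--                 stack[-1][1] = stack[-1][1] + 1
--             else:
--                 #if current does not equal most recent element in the stack then add that element to the stack with a value of 1
--                 stack.append([arr[x], 1])
--         else:
--             #if the stack is empty then add current element to stack with value of 1
--             stack.append([arr[x], 1])
--     #return count
--     return count
-- ===== SOURCE B (Python) =====
-- def solve(arr):
--     # Brute-force pair count: for each right endpoint i, scan left; a strictly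
--     # taller building blocks permanently, each equal height adds 2 routes.
--     count = 0
--     for i in range(len(arr)):
--         for j in range(i - 1, -1, -1):
--             if arr[j] > arr[i]:
--                 break
--             if arr[j] == arr[i]:
--                 count += 2
--     return count
-- ===== Notes on version B (the rewrite author's own statement) =====
-- stated objective: simpler
-- what changed: Replaced the monotonic stack of (height, multiplicity) pairs with a plain brute-force double loop: for each building scan leftward, break at the first strictly taller building, add 2 per equal height.
import Mathlib
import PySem

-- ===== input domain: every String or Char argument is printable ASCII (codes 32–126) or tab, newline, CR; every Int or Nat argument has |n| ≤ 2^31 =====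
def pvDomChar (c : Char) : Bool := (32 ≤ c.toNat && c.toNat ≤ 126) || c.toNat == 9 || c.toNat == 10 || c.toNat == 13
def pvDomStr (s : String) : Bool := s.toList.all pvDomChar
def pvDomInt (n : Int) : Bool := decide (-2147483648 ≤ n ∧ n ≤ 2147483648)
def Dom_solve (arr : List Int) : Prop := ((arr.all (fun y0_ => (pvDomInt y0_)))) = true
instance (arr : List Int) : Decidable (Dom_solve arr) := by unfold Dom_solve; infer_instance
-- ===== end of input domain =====

-- B replaces A's monotonic stack of (height, multiplicity) pairs by a plain
-- O(n^2) double loop: for each right endpoint scan left, break at the first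
-- strictly taller building, add 2 per equal height (objective: simpler).

-- ===== PORT A =====
-- the while-loop: pop while the new height is strictly greater than the top
def popLoop (h : Int) : List (Int × Int) → List (Int × Int)
  | [] => []
  | t :: rest => if h > t.1 then popLoop h rest else t :: rest

-- one iteration of A's for-loop; state = (stack with top at head, count)
def stepA (s : List (Int × Int) × Int) (h : Int) : List (Int × Int) × Int :=
  let stack := popLoop h s.1
  match stack with
  | [] => ([(h, 1)], s.2)
  | t :: rest =>
    if h = t.1 then ((t.1, t.2 + 1) :: rest, s.2 + t.2 * 2)
    else ((h, 1) :: t :: rest, s.2)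

def solve (arr : List Int) : Int := (arr.foldl stepA ([], 0)).2

-- ===== PORT B =====
-- the inner loop: j runs from i-1 down to 0, i.e. over the reversed prefix;
-- break at the first strictly taller building, +2 per equal height
def scanB (h : Int) : List Int → Int
  | [] => 0
  | a :: rest => if a > h then 0 else (if a = h then 2 else 0) + scanB h rest

-- outer loop; state = (reversed prefix arr[i-1], …, arr[0], count)
def solve_alt (arr : List Int) : Int :=
  (arr.foldl (fun (s : List Int × Int) h => (h :: s.1, s.2 + scanB h s.1)) ([], 0)).2

-- ===== PRECONDITION & SPEC =====
def Spec_solve (arr : List Int) (out : Int) : Prop := out = solve_alt arr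
instance (arr : List Int) (out : Int) : Decidable (Spec_solve arr out) := by unfold Spec_solve; infer_instance

-- ===== CLAIM (what is proved, stated in full; the proofs are below) =====
def Claim_equal_solve : Prop := ∀ (arr : List Int), Dom_solve arr → Spec_solve arr (solve arr)

-- ===== LEMMAS AND PROOFS =====

-- the "visible" (unblocked-from-the-right) heights of a reversed prefix
def vis : List Int → List Int
  | [] => []
  | a :: r => a :: (vis r).dropWhile (fun x => x < a)

-- flatten a stack of (height, multiplicity) pairs to the flat height list
def flat (st : List (Int × Int)) : List Int :=
  st.flatMap (fun t => List.replicate t.2.toNat t.1)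

-- well-formedness of A's stack: heights strictly increase from the top
-- (head) downward and every multiplicity is ≥ 1
def StkInv (st : List (Int × Int)) : Prop :=
  List.Pairwise (fun a b => a.1 < b.1) st ∧ ∀ t ∈ st, 1 ≤ t.2

theorem dropWhile_append_all {α : Type} (p : α → Bool) (l1 l2 : List α)
    (h : ∀ x ∈ l1, p x = true) :
    (l1 ++ l2).dropWhile p = l2.dropWhile p := by
  induction l1 with
  | nil => rfl
  | cons a l1 ih =>
    simp only [List.cons_append, List.dropWhile_cons, h a (List.mem_cons_self)]
    exact ih (fun x hx => h x (List.mem_cons_of_mem _ hx))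

theorem takeWhile_append_all {α : Type} (p : α → Bool) (l1 l2 : List α)
    (h : ∀ x ∈ l1, p x = true) :
    (l1 ++ l2).takeWhile p = l1 ++ l2.takeWhile p := by
  induction l1 with
  | nil => rfl
  | cons a l1 ih =>
    simp [h a (List.mem_cons_self),
      ih (fun x hx => h x (List.mem_cons_of_mem _ hx))]

theorem dropWhile_dropWhile_lt (a h : Int) (ha : a ≤ h) (xs : List Int) :
    (xs.dropWhile (fun x => x < a)).dropWhile (fun x => x < h)
      = xs.dropWhile (fun x => x < h) := by
  induction xs with
  | nil => rfl
  | cons x xs ih =>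
    by_cases hx : x < a
    · have hx' : x < h := lt_of_lt_of_le hx ha
      simp [hx, hx', ih]
    · simp [List.dropWhile_cons, hx]

theorem scanB_eq (h : Int) (rev : List Int) :
    scanB h rev
      = 2 * (((vis rev).dropWhile (fun x => x < h)).takeWhile (fun x => x = h)).length := by
  induction rev with
  | nil => simp [scanB, vis]
  | cons a r ih =>
    rcases lt_trichotomy a h with hlt | heq | hgt
    · have h1 : ¬ a > h := by omega
      have h2 : ¬ a = h := by omega
      rw [scanB, if_neg h1, if_neg h2, ih, vis, List.dropWhile_cons]
      simp only [hlt, decide_true, if_true, dropWhile_dropWhile_lt a h (le_of_lt hlt)]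
      ring
    · subst heq
      have h1 : ¬ a > a := by omega
      have h2 : ¬ a < a := by omega
      rw [scanB, if_neg h1, if_pos rfl, ih, vis, List.dropWhile_cons]
      simp only [h2, decide_false, Bool.false_eq_true, if_false, List.takeWhile_cons,
        decide_true, if_true, List.length_cons]
      push_cast
      ring
    · have h1 : a > h := hgt
      have h2 : ¬ a < h := by omega
      have h3 : ¬ a = h := by omega
      rw [scanB, if_pos h1, vis, List.dropWhile_cons]
      simp [h2, h3]

theorem inv_tail {t : Int × Int} {rest : List (Int × Int)} (hI : StkInv (t :: rest)) :
    StkInv rest := by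
  obtain ⟨hp, hc⟩ := hI
  exact ⟨(List.pairwise_cons.mp hp).2, fun u hu => hc u (List.mem_cons_of_mem _ hu)⟩

theorem flat_popLoop (h : Int) (st : List (Int × Int)) (hI : StkInv st) :
    flat (popLoop h st) = (flat st).dropWhile (fun x => x < h) := by
  induction st with
  | nil => rfl
  | cons t rest ih =>
    by_cases hp : h > t.1
    · have hall : ∀ x ∈ List.replicate t.2.toNat t.1, (fun x : Int => decide (x < h)) x = true := by
        intro x hx
        rcases List.eq_of_mem_replicate hx with rfl
        simpa using hp
      have hsplit : flat (t :: rest) = List.replicate t.2.toNat t.1 ++ flat rest := by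
        simp [flat]
      rw [popLoop, if_pos hp, hsplit, dropWhile_append_all _ _ _ hall]
      exact ih (inv_tail hI)
    · have hc : 1 ≤ t.2 := hI.2 t (List.mem_cons_self)
      obtain ⟨n, hn⟩ : ∃ n, t.2.toNat = n + 1 := ⟨t.2.toNat - 1, by omega⟩
      have h2 : ¬ (t.1 < h) := by omega
      rw [popLoop, if_neg hp, flat, List.flatMap_cons, hn, List.replicate_succ,
        List.cons_append, List.dropWhile_cons]
      simp [h2]

theorem popLoop_sublist (h : Int) (st : List (Int × Int)) :
    (popLoop h st).Sublist st := by
  induction st with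
  | nil => simp [popLoop]
  | cons t rest ih =>
    by_cases hp : h > t.1
    · simpa [popLoop, hp] using ih.trans (List.sublist_cons_self t rest)
    · simp [popLoop, hp]

theorem inv_popLoop (h : Int) (st : List (Int × Int)) (hI : StkInv st) :
    StkInv (popLoop h st) := by
  refine ⟨hI.1.sublist (popLoop_sublist h st), fun t ht => hI.2 t ?_⟩
  exact (popLoop_sublist h st).mem ht

theorem popLoop_head (h : Int) (st : List (Int × Int)) (t : Int × Int)
    (rest : List (Int × Int)) (hpop : popLoop h st = t :: rest) : ¬ h > t.1 := by
  induction st with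
  | nil => simp [popLoop] at hpop
  | cons u us ih =>
    by_cases hp : h > u.1
    · exact ih (by simpa [popLoop, hp] using hpop)
    · rw [popLoop, if_neg hp] at hpop
      cases hpop; exact hp

-- first element of the flattened tail is strictly taller than the top height
theorem takeWhile_flat_top (h : Int) (rest : List (Int × Int))
    (hrest : ∀ u ∈ rest, h < u.1) (hInv : StkInv rest) :
    (flat rest).takeWhile (fun x => x = h) = [] := by
  cases rest with
  | nil => rfl
  | cons u rs =>
    have hc : 1 ≤ u.2 := hInv.2 u (List.mem_cons_self)
    obtain ⟨n, hn⟩ : ∃ n, u.2.toNat = n + 1 := ⟨u.2.toNat - 1, by omega⟩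
    have hu : h < u.1 := hrest u (List.mem_cons_self)
    have hne : ¬ (u.1 = h) := by omega
    rw [flat, List.flatMap_cons, hn, List.replicate_succ, List.cons_append,
      List.takeWhile_cons]
    simp [hne]

-- one synchronized step: the relation between A's state and B's state is preserved
theorem step_rel (h : Int) (st : List (Int × Int)) (rev : List Int) (cA cB : Int)
    (hI : StkInv st) (hfl : flat st = vis rev) (hc : cA = cB) :
    StkInv (stepA (st, cA) h).1 ∧
    flat (stepA (st, cA) h).1 = vis (h :: rev) ∧
    (stepA (st, cA) h).2 = cB + scanB h rev := by
  have hdrop : flat (popLoop h st) = (vis rev).dropWhile (fun x => x < h) := by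
    rw [flat_popLoop h st hI, hfl]
  have hIp : StkInv (popLoop h st) := inv_popLoop h st hI
  have hscan := scanB_eq h rev
  cases hpop : popLoop h st with
  | nil =>
    rw [hpop] at hdrop hIp
    have hstep : stepA (st, cA) h = ([(h, 1)], cA) := by simp [stepA, hpop]
    refine ⟨?_, ?_, ?_⟩
    · rw [hstep]; exact ⟨by simp, by simp⟩
    · rw [hstep]
      show flat [(h, 1)] = vis (h :: rev)
      simp only [vis, ← hdrop]
      simp [flat]
    · have hz : scanB h rev = 0 := by
        rw [hscan, ← hdrop]; simp [flat]
      rw [hstep]; simp [hz, hc]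
  | cons t rest =>
    rw [hpop] at hdrop hIp
    have hct : 1 ≤ t.2 := hIp.2 t (List.mem_cons_self)
    obtain ⟨m, hm⟩ : ∃ m, t.2.toNat = m + 1 := ⟨t.2.toNat - 1, by omega⟩
    by_cases heq : h = t.1
    · have hstep : stepA (st, cA) h = ((t.1, t.2 + 1) :: rest, cA + t.2 * 2) := by
        simp only [stepA, hpop]
        rw [if_pos heq]
      have htk : (flat (t :: rest)).takeWhile (fun x => x = h) = List.replicate t.2.toNat t.1 := by
        have hr := takeWhile_flat_top h rest
          (fun u hu => heq ▸ (List.pairwise_cons.mp hIp.1).1 u hu) (inv_tail hIp)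
        have hsplit : flat (t :: rest) = List.replicate t.2.toNat t.1 ++ flat rest := by
          simp [flat]
        rw [hsplit, takeWhile_append_all _ _ _
          (by intro x hx; rcases List.eq_of_mem_replicate hx with rfl; simp [heq.symm]),
          hr, List.append_nil]
      have hscan2 : scanB h rev = 2 * (t.2.toNat : Int) := by
        rw [hscan, ← hdrop, htk]; simp
      refine ⟨?_, ?_, ?_⟩
      · rw [hstep]
        refine ⟨List.pairwise_cons.mpr
          ⟨(List.pairwise_cons.mp hIp.1).1, (List.pairwise_cons.mp hIp.1).2⟩, ?_⟩
        intro u hu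
        rcases List.mem_cons.mp hu with rfl | hu
        · simp only; omega
        · exact hIp.2 u (List.mem_cons_of_mem _ hu)
      · rw [hstep]
        show flat ((t.1, t.2 + 1) :: rest) = vis (h :: rev)
        have hsucc : (t.2 + 1).toNat = t.2.toNat + 1 := by omega
        simp only [vis, ← hdrop]
        simp [flat, hsucc, heq, List.replicate_succ]
      · rw [hstep]; simp only [hscan2, hc]; omega
    · have hlt : h < t.1 := by
        have := popLoop_head h st t rest hpop
        omega
      have hstep : stepA (st, cA) h = ((h, 1) :: t :: rest, cA) := by
        simp only [stepA, hpop]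
        rw [if_neg heq]
      have htk0 : (flat (t :: rest)).takeWhile (fun x => x = h) = [] := by
        have hne : ¬ (t.1 = h) := by omega
        rw [flat, List.flatMap_cons, hm, List.replicate_succ, List.cons_append,
          List.takeWhile_cons]
        simp [hne]
      have hscan0 : scanB h rev = 0 := by rw [hscan, ← hdrop, htk0]; simp
      refine ⟨?_, ?_, ?_⟩
      · rw [hstep]
        refine ⟨List.pairwise_cons.mpr ⟨?_, hIp.1⟩, ?_⟩
        · intro u hu
          rcases List.mem_cons.mp hu with rfl | hu
          · exact hlt
          · exact lt_trans hlt ((List.pairwise_cons.mp hIp.1).1 u hu)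
        · intro u hu
          rcases List.mem_cons.mp hu with rfl | hu
          · simp only; omega
          · exact hIp.2 u hu
      · rw [hstep]
        show flat ((h, 1) :: t :: rest) = vis (h :: rev)
        simp only [vis, ← hdrop]
        simp [flat]
      · rw [hstep]; simp [hscan0, hc]

theorem fold_rel (xs : List Int) (st : List (Int × Int)) (rev : List Int) (cA cB : Int)
    (hI : StkInv st) (hfl : flat st = vis rev) (hc : cA = cB) :
    (xs.foldl stepA (st, cA)).2
      = (xs.foldl (fun (s : List Int × Int) h => (h :: s.1, s.2 + scanB h s.1)) (rev, cB)).2 := by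
  induction xs generalizing st rev cA cB with
  | nil => simpa using hc
  | cons h xs ih =>
    obtain ⟨hI2, hfl2, hc2⟩ := step_rel h st rev cA cB hI hfl hc
    simp only [List.foldl_cons]
    have := ih (stepA (st, cA) h).1 (h :: rev) (stepA (st, cA) h).2 (cB + scanB h rev) hI2 hfl2 hc2
    simpa using this

-- ===== VERDICT (by name: the statement is the Claim_ definition above) =====
theorem solve_spec : Claim_equal_solve := by
  intro arr _
  unfold Spec_solve solve solve_alt
  exact fold_rel arr [] [] 0 0 ⟨List.Pairwise.nil, by simp⟩ rfl rfl
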